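-- pv_equiv track=rewrite | github.com/VladimirShubinkin/Polyakov | kompege/27/27_17834.py | get_clusters_B
-- ===== SOURCE A (Python) =====
-- def get_clusters_B(coords):
--     cluster_1 = []
--     cluster_2 = []
--     cluster_3 = []
--     for x, y in coords:
--         if y < -abs(x - 4) + 4:
--             cluster_1.append((x, y))
--         elif x < 4:
--             cluster_2.append((x, y))
--         else:
--             cluster_3.append((x, y))
--     return cluster_1, cluster_2, cluster_3
-- ===== SOURCE B (Python) =====
-- def get_clusters_B(coords):
--     # Stable sort by cluster id, then cut the sorted list at the counted
--     # boundaries; stability keeps the original order inside each cluster.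
--     def key(p):
--         x, y = p
--         if y < -abs(x - 4) + 4:
--             return 0
--         if x < 4:
--             return 1
--         return 2
--     tagged = sorted(coords, key=key)
--     k0 = sum(1 for p in coords if key(p) == 0)
--     k1 = sum(1 for p in coords if key(p) == 1)
--     return tagged[:k0], tagged[k0:k0 + k1], tagged[k0 + k1:]
-- ===== Notes on version B (the rewrite author's own statement) =====
-- stated objective: alternative
-- what changed: Replaced A's single routing loop with three accumulators by a sort-based grouping: stable-sort the points by their cluster id (0/1/2) and cut the sorted list at the counted cluster-size boundaries, relying on sort stability to preserve the original order within each cluster.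
import Mathlib
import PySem

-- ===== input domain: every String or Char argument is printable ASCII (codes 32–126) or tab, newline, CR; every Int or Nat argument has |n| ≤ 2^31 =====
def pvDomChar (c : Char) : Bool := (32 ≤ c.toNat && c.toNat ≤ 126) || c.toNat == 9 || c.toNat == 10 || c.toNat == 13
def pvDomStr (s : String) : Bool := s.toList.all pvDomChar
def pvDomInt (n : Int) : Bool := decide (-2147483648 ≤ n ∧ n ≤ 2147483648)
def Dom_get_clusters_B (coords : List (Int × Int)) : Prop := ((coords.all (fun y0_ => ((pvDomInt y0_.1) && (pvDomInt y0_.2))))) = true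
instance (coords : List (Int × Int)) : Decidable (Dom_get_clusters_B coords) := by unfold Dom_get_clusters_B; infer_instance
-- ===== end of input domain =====

-- B replaces A's single routing loop by a stable sort on the cluster id followed by
-- cutting at counted boundaries (alternative algorithm; not claimed faster).


-- ===== PORT A =====
-- one pass: fold over coords routing each point into one of three accumulators (appended at the back, as Python's append)
def get_clusters_B (coords : List (Int × Int)) : (List (Int × Int)) × (List (Int × Int)) × (List (Int × Int)) :=
  coords.foldl
    (fun acc p =>
      let (c1, c2, c3) := acc
      let (x, y) := p
      if y < -|x - 4| + 4 then (c1 ++ [(x, y)], c2, c3)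
      else if x < 4 then (c1, c2 ++ [(x, y)], c3)
      else (c1, c2, c3 ++ [(x, y)]))
    ([], [], [])

-- ===== PORT B =====
-- Source B's key(p): the cluster id of a point
def pvKey (p : Int × Int) : Int :=
  if p.2 < -|p.1 - 4| + 4 then 0 else if p.1 < 4 then 1 else 2

-- stable sort by cluster id, count the first two cluster sizes, slice
def get_clusters_B_alt (coords : List (Int × Int)) : (List (Int × Int)) × (List (Int × Int)) × (List (Int × Int)) :=
  let tagged := PySem.List.sorted coords pvKey
  let k0 := coords.countP (fun p => pvKey p == 0)
  let k1 := coords.countP (fun p => pvKey p == 1)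
  (PySem.List.slice tagged none (some (k0 : Int)),
   PySem.List.slice tagged (some (k0 : Int)) (some ((k0 : Int) + (k1 : Int))),
   PySem.List.slice tagged (some ((k0 : Int) + (k1 : Int))) none)

-- ===== PRECONDITION & SPEC =====
def Spec_get_clusters_B (coords : List (Int × Int)) (out : (List (Int × Int)) × (List (Int × Int)) × (List (Int × Int))) : Prop := out = get_clusters_B_alt coords
instance (coords : List (Int × Int)) (out : (List (Int × Int)) × (List (Int × Int)) × (List (Int × Int))) : Decidable (Spec_get_clusters_B coords out) := by unfold Spec_get_clusters_B; infer_instance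

-- ===== CLAIM (what is proved, stated in full; the proofs are below) =====
def Claim_equal_get_clusters_B : Prop := ∀ (coords : List (Int × Int)), Dom_get_clusters_B coords → Spec_get_clusters_B coords (get_clusters_B coords)

-- ===== LEMMAS AND PROOFS =====
-- the three key-groups of a list, in original order
def pvG (i : Int) (xs : List (Int × Int)) : List (Int × Int) := xs.filter (fun p => pvKey p == i)

-- A's routing step, named for the proof
def pvStepA (acc : (List (Int × Int)) × (List (Int × Int)) × (List (Int × Int))) (p : Int × Int) :
    (List (Int × Int)) × (List (Int × Int)) × (List (Int × Int)) :=
  let (c1, c2, c3) := acc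
  let (x, y) := p
  if y < -|x - 4| + 4 then (c1 ++ [(x, y)], c2, c3)
  else if x < 4 then (c1, c2 ++ [(x, y)], c3)
  else (c1, c2, c3 ++ [(x, y)])

lemma get_clusters_B_eq_fold (coords : List (Int × Int)) :
    get_clusters_B coords = coords.foldl pvStepA ([], [], []) := rfl

-- A's loop invariant: the fold appends the three key-groups of the suffix
lemma get_clusters_B_fold_inv (coords : List (Int × Int)) (c1 c2 c3 : List (Int × Int)) :
    coords.foldl pvStepA (c1, c2, c3)
    = (c1 ++ pvG 0 coords, c2 ++ pvG 1 coords, c3 ++ pvG 2 coords) := by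
  induction coords generalizing c1 c2 c3 with
  | nil => simp [pvG]
  | cons hd tl ih =>
    obtain ⟨x, y⟩ := hd
    rw [List.foldl_cons]
    by_cases h1 : y < -|x - 4| + 4
    · have hk : pvKey (x, y) = 0 := by simp [pvKey, h1]
      have hs : pvStepA (c1, c2, c3) (x, y) = (c1 ++ [(x, y)], c2, c3) := by
        simp [pvStepA, h1]
      rw [hs, ih]
      simp [pvG, hk]
    · by_cases h2 : x < 4
      · have hk : pvKey (x, y) = 1 := by simp [pvKey, h1, h2]
        have hs : pvStepA (c1, c2, c3) (x, y) = (c1, c2 ++ [(x, y)], c3) := by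
          simp [pvStepA, h1, h2]
        rw [hs, ih]
        simp [pvG, hk]
      · have hk : pvKey (x, y) = 2 := by simp [pvKey, h1, h2]
        have hs : pvStepA (c1, c2, c3) (x, y) = (c1, c2, c3 ++ [(x, y)]) := by
          simp [pvStepA, h1, h2]
        rw [hs, ih]
        simp [pvG, hk]

-- insertBy lands exactly between a prefix it is not 'before' and a suffix it is 'before'
lemma insertBy_split {α : Type} (before : α → α → Bool) (x : α) (l1 l2 : List α)
    (h1 : ∀ a ∈ l1, before x a = false) (h2 : ∀ a ∈ l2, before x a = true) :
    PySem.List.insertBy before x (l1 ++ l2) = l1 ++ x :: l2 := by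
  induction l1 with
  | nil =>
    cases l2 with
    | nil => simp [PySem.List.insertBy]
    | cons b t => simp [PySem.List.insertBy, h2 b (by simp)]
  | cons a t ih =>
    have ha : before x a = false := h1 a (by simp)
    simp only [List.cons_append, PySem.List.insertBy, ha]
    simp only [Bool.false_eq_true, if_false, List.cons.injEq, true_and]
    exact ih (fun a ha => h1 a (by simp [ha]))

lemma mem_pvG (i : Int) (xs : List (Int × Int)) (a : Int × Int) (h : a ∈ pvG i xs) :
    pvKey a = i := by
  have := List.of_mem_filter h
  simpa using this

-- stability: the sorted list is the concatenation of the three key-groups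
lemma sorted_eq_groups (coords : List (Int × Int)) :
    PySem.List.sorted coords pvKey = pvG 0 coords ++ pvG 1 coords ++ pvG 2 coords := by
  induction coords using List.reverseRecOn with
  | nil => simp [PySem.List.sorted_eq_foldl_insertBy, pvG]
  | append_singleton xs x ih =>
    rw [PySem.List.sorted_eq_foldl_insertBy] at *
    rw [List.foldl_append, List.foldl_cons, List.foldl_nil, ih]
    have hb : (0 : Int) ≤ pvKey x ∧ pvKey x ≤ 2 := by
      unfold pvKey; split_ifs <;> simp
    have hG : ∀ i, pvG i (xs ++ [x]) = pvG i xs ++ if pvKey x == i then [x] else [] := by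
      intro i; simp [pvG, List.filter_append, List.filter_cons]
    obtain ⟨hb1, hb2⟩ := hb
    interval_cases h : pvKey x
    · rw [List.append_assoc, insertBy_split _ x (pvG 0 xs) (pvG 1 xs ++ pvG 2 xs)
        (fun a ha => by simp [h, mem_pvG _ _ _ ha])
        (fun a ha => by
          rcases List.mem_append.mp ha with ha | ha <;>
            simp [h, mem_pvG _ _ _ ha])]
      simp [hG]
    · rw [List.append_assoc, ← List.append_assoc (pvG 0 xs),
        insertBy_split _ x (pvG 0 xs ++ pvG 1 xs) (pvG 2 xs)
        (fun a ha => by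
          rcases List.mem_append.mp ha with ha | ha <;>
            simp [h, mem_pvG _ _ _ ha])
        (fun a ha => by simp [h, mem_pvG _ _ _ ha])]
      simp [hG]
    · rw [← List.append_nil (pvG 0 xs ++ pvG 1 xs ++ pvG 2 xs),
        insertBy_split _ x (pvG 0 xs ++ pvG 1 xs ++ pvG 2 xs) []
        (fun a ha => by
          rcases List.mem_append.mp ha with ha | ha
          · rcases List.mem_append.mp ha with ha | ha <;>
              simp [h, mem_pvG _ _ _ ha]
          · simp [h, mem_pvG _ _ _ ha])
        (fun a ha => by simp at ha)]
      simp [hG]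

lemma countP_eq_len (i : Int) (xs : List (Int × Int)) :
    xs.countP (fun p => pvKey p == i) = (pvG i xs).length := by
  simp [pvG, List.countP_eq_length_filter]

-- ===== VERDICT (by name: the statement is the Claim_ definition above) =====
theorem get_clusters_B_spec : Claim_equal_get_clusters_B := by
  intro coords _
  unfold Spec_get_clusters_B
  rw [get_clusters_B_eq_fold, get_clusters_B_fold_inv coords [] [] []]
  simp only [get_clusters_B_alt]
  rw [sorted_eq_groups, countP_eq_len, countP_eq_len]
  rw [show ((pvG 0 coords).length : Int) + ((pvG 1 coords).length : Int)
      = (((pvG 0 coords).length + (pvG 1 coords).length : Nat) : Int) by push_cast; ring]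
  rw [PySem.List.slice_to_natCast, PySem.List.slice_from_natCast, PySem.List.slice_natCast]
  refine Prod.ext ?_ (Prod.ext ?_ ?_)
  · simp [List.append_assoc]
  · simp [List.append_assoc]
  · simp [List.append_assoc]
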